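-- pv_equiv track=rewrite | github.com/stupidchen/leetcode | src/leetcode/P3702.py | isAlienSorted
-- ===== SOURCE A (Python) =====
-- def isAlienSorted(words, order):
--     """
--     :type words: List[str]
--     :type order: str
--     :rtype: bool
--     """
--     n = len(words)
--     for i in range(n):
--         t = words[i]
--         r = ''
--         for j in t:
--             r += chr(order.find(j) + 97)
--         words[i] = r
--     for i in range(n):
--         for j in range(i + 1, n):
--             if words[i] > words[j]:
--                 return False
--     return True
-- ===== SOURCE B (Python) =====
-- def isAlienSorted(words, order):
--     """
--     :type words: List[str]
--     :type order: str
--     :rtype: bool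
--     """
--     keys = [[order.find(c) for c in w] for w in words]
--     return all(k1 <= k2 for k1, k2 in zip(keys, keys[1:]))
-- ===== Notes on version B (the rewrite author's own statement) =====
-- stated objective: faster
-- what changed: B maps each word once to its list of order-ranks and checks only the n-1 adjacent pairs, instead of A's rebuilding every word as a chr-remapped string and comparing all O(n^2) pairs; A also mutates the words list in place, B does not.
import Mathlib
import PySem

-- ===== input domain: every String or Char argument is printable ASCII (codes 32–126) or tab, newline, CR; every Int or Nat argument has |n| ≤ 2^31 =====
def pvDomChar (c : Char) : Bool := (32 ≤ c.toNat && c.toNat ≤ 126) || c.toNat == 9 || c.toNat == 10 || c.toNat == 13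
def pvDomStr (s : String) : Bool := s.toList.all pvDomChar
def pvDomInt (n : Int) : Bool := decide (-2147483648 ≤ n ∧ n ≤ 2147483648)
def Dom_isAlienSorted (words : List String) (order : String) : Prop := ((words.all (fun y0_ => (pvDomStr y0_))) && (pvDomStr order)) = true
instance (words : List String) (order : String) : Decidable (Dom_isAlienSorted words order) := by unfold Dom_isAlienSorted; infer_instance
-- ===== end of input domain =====

-- B replaces A's all-pairs check on chr-remapped words by comparing only adjacent words'
-- integer rank lists (objective: faster, O(n·L) comparisons instead of O(n²·L)).
-- Note: Python A overwrites the elements of `words` in place; B does not — the equivalence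
-- proved here is about the RETURN value only.

-- ===== PORT A =====
-- A's remapped Python string of chr(order.find(j)+97) characters is modelled by its list of
-- code points (List Int): Python compares strings by code-point lexicographic order, so this
-- is exact, including code points beyond Lean's Char range for very long `order`.
def pvMapWord (order : String) (t : String) : List Int :=
  -- r = ''; for j in t: r += chr(order.find(j) + 97)
  t.toList.foldl (fun r c => r ++ [PySem.Str.find order (String.singleton c) + 97]) []

-- the nested `for i / for j in range(i+1, n): if words[i] > words[j]: return False` loops
def pvPairCheck : List (List Int) → Bool
  | [] => true
  | w :: rest => if rest.any (fun v => decide (v < w)) then false else pvPairCheck rest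

def isAlienSorted (words : List String) (order : String) : Bool :=
  pvPairCheck (words.map (pvMapWord order))

-- ===== PORT B =====
def isAlienSorted_alt (words : List String) (order : String) : Bool :=
  let keys := words.map (fun w => w.toList.map (fun c => PySem.Str.find order (String.singleton c)))
  (keys.zip (keys.drop 1)).all (fun p => decide (p.1 ≤ p.2))

-- ===== PRECONDITION & SPEC =====
def Spec_isAlienSorted (words : List String) (order : String) (out : Bool) : Prop := out = isAlienSorted_alt words order
instance (words : List String) (order : String) (out : Bool) : Decidable (Spec_isAlienSorted words order out) := by unfold Spec_isAlienSorted; infer_instance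

-- ===== CLAIM (what is proved, stated in full; the proofs are below) =====
def Claim_equal_isAlienSorted : Prop := ∀ (words : List String) (order : String), Dom_isAlienSorted words order → Spec_isAlienSorted words order (isAlienSorted words order)

-- ===== LEMMAS AND PROOFS =====

-- each word as its list of ranks (B's key for a word)
def pvKey (order : String) (w : String) : List Int :=
  w.toList.map (fun c => PySem.Str.find order (String.singleton c))

-- inversion for lex on cons cells
lemma pvLex_cons_inv {α : Type} [LT α] {x y : α} {xs ys : List α}
    (h : List.Lex (· < ·) (x :: xs) (y :: ys)) :
    x < y ∨ (x = y ∧ List.Lex (· < ·) xs ys) := by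
  cases h with
  | rel h => exact Or.inl h
  | cons h => exact Or.inr ⟨rfl, h⟩

-- lex order is invariant under the +97 shift A applies to every rank
lemma pvLex_shift_iff (l m : List Int) :
    List.Lex (· < ·) (l.map (· + 97)) (m.map (· + 97)) ↔ List.Lex (· < ·) l m := by
  induction l generalizing m with
  | nil =>
    cases m with
    | nil => simp
    | cons b bs => simp
  | cons a as ih =>
    cases m with
    | nil => constructor <;> (intro h; cases h)
    | cons b bs =>
      simp only [List.map]
      constructor
      · intro h
        rcases pvLex_cons_inv h with h2 | ⟨heq, h2⟩
        · exact List.Lex.rel (by omega)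
        · have hab : a = b := by omega
          subst hab
          exact List.Lex.cons ((ih bs).mp h2)
      · intro h
        rcases pvLex_cons_inv h with h2 | ⟨heq, h2⟩
        · exact List.Lex.rel (by omega)
        · subst heq
          exact List.Lex.cons ((ih bs).mpr h2)

lemma pvMapWord_eq (order : String) (t : String) :
    pvMapWord order t = (pvKey order t).map (· + 97) := by
  unfold pvMapWord pvKey
  rw [PySem.List.foldl_append_singleton_eq_map]
  simp [List.map_map, Function.comp_def]

lemma pvMapWord_lt_iff (order : String) (v w : String) :
    (pvMapWord order v < pvMapWord order w) ↔ pvKey order v < pvKey order w := by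
  rw [pvMapWord_eq, pvMapWord_eq]
  exact pvLex_shift_iff _ _

lemma pvPairCheck_iff (l : List (List Int)) :
    pvPairCheck l = true ↔ l.Pairwise (fun w v => ¬ v < w) := by
  induction l with
  | nil => simp [pvPairCheck]
  | cons w rest ih =>
    simp [pvPairCheck, List.pairwise_cons, ih]

lemma pvZipAll_iff (l : List (List Int)) :
    ((l.zip (l.drop 1)).all (fun p => decide (p.1 ≤ p.2)) = true) ↔ l.IsChain (· ≤ ·) := by
  induction l with
  | nil => simp
  | cons a t ih =>
    cases t with
    | nil => simp
    | cons b t' =>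
      simp only [List.drop_succ_cons, List.drop_zero, List.zip_cons_cons, List.all_cons,
        Bool.and_eq_true, decide_eq_true_eq, List.isChain_cons_cons]
      rw [← ih]
      simp

-- ===== VERDICT (by name: the statement is the Claim_ definition above) =====
theorem isAlienSorted_spec : Claim_equal_isAlienSorted := by
  intro words order hdom
  unfold Spec_isAlienSorted isAlienSorted isAlienSorted_alt
  have hkeys : (fun w : String => w.toList.map (fun c => PySem.Str.find order (String.singleton c)))
      = pvKey order := by
    funext w; simp [pvKey]
  rw [hkeys]
  rw [Bool.eq_iff_iff, pvPairCheck_iff, pvZipAll_iff, List.isChain_iff_pairwise,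
    List.pairwise_map, List.pairwise_map]
  apply List.Pairwise.iff
  intro v w
  rw [← Std.not_lt]
  constructor
  · intro h hlt
    exact h ((pvMapWord_lt_iff order w v).mpr hlt)
  · intro h hlt
    exact h ((pvMapWord_lt_iff order w v).mp hlt)
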